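-- pv_equiv track=rewrite | github.com/audrow/gre_quant_practice | quizzer.py | findFirstValueWithDivisorAboveValue
-- ===== SOURCE A (Python) =====
-- def findFirstValueWithDivisorAboveValue(value, divisor):
--     if value % 1 != 0: raise ValueError('`value` must not have decimals')
--     if divisor % 1 != 0: raise ValueError('`divisor` must not have decimals')
--     if divisor == 0: raise ValueError('`divisor` must not be 0')
--     if divisor == 0: raise ValueError('`divisor` must not be 0')
--
--     while value % divisor != 0:
--         value += 1
--     return value
-- ===== SOURCE B (Python) =====
-- def findFirstValueWithDivisorAboveValue(value, divisor):
--     if value % 1 != 0: raise ValueError('`value` must not have decimals')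
--     if divisor % 1 != 0: raise ValueError('`divisor` must not have decimals')
--     if divisor == 0: raise ValueError('`divisor` must not be 0')
--     return value + (-value) % abs(divisor)
-- ===== Notes on version B (the rewrite author's own statement) =====
-- stated objective: faster
-- what changed: Replaces the O(|divisor|) increment-until-divisible loop with the closed form value + (-value) % abs(divisor).
import Mathlib
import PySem

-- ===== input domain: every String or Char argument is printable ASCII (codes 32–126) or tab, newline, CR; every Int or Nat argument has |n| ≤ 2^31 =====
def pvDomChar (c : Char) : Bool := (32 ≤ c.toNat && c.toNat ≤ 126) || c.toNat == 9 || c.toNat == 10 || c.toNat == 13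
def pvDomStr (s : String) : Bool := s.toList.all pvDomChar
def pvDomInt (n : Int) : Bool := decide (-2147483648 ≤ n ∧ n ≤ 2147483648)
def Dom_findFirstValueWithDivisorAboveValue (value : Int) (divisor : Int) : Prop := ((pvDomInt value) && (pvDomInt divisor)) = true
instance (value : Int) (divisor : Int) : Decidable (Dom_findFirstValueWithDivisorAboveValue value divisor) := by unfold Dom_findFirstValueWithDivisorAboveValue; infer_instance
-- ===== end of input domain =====

-- B replaces A's O(|divisor|) increment-until-divisible loop by the closed form
-- value + (-value) % abs(divisor); Pre_ excludes divisor = 0, where A raises ValueError.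


-- ===== PORT A =====
-- A's while loop: increment value until value % divisor == 0.
-- The 'divisor ≠ 0' conjunct is a totality guard only (A raises before the loop when divisor = 0).
def pvLoopA (divisor : Int) (value : Int) : Int :=
  if _h : divisor ≠ 0 ∧ PySem.Int.mod value divisor ≠ 0 then
    pvLoopA divisor (value + 1)
  else value
termination_by ((-value) % ((divisor.natAbs : Int))).toNat
decreasing_by
  obtain ⟨hd, hm⟩ := _h
  have hdpos : (0:Int) < (divisor.natAbs : Int) := by
    have := Int.natAbs_pos.mpr hd; exact_mod_cast this
  have hdvd : ¬ ((divisor.natAbs : Int) ∣ -value) := by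
    intro hdvd
    apply hm
    rw [PySem.Int.mod_eq_zero_iff_dvd]
    have : divisor.natAbs ∣ value.natAbs := by
      rw [Int.natCast_dvd_natCast.symm]
      simpa [Int.natAbs_dvd, Int.dvd_natAbs] using hdvd
    exact Int.natAbs_dvd_natAbs.mp this
  have h1 : (0:Int) ≤ ((-value) % (divisor.natAbs : Int)) := Int.emod_nonneg _ (by omega)
  have h2 : ((-value) % (divisor.natAbs : Int)) < (divisor.natAbs : Int) := Int.emod_lt_of_pos _ hdpos
  have hne : ((-value) % (divisor.natAbs : Int)) ≠ 0 := by
    intro h0; exact hdvd (Int.dvd_of_emod_eq_zero h0)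
  have hq := Int.mul_ediv_add_emod (-value) (divisor.natAbs : Int)
  have hrepr : -(value + 1)
      = ((-value) % (divisor.natAbs : Int) - 1) + (divisor.natAbs : Int) * ((-value) / (divisor.natAbs : Int)) := by
    omega
  have hstep : ((-(value + 1)) % (divisor.natAbs : Int))
      = ((-value) % (divisor.natAbs : Int)) - 1 := by
    rw [hrepr, Int.add_mul_emod_self_left, Int.emod_eq_of_lt (by omega) (by omega)]
  omega

def findFirstValueWithDivisorAboveValue (value : Int) (divisor : Int) : Int :=
  pvLoopA divisor value

-- ===== PORT B =====
def findFirstValueWithDivisorAboveValue_alt (value : Int) (divisor : Int) : Int :=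
  value + PySem.Int.mod (-value) |divisor|

-- ===== PRECONDITION & SPEC =====
-- Pre_ excludes exactly divisor = 0, where A raises ValueError.
def Pre_findFirstValueWithDivisorAboveValue (value : Int) (divisor : Int) : Prop := divisor ≠ 0
instance (value : Int) (divisor : Int) : Decidable (Pre_findFirstValueWithDivisorAboveValue value divisor) := by unfold Pre_findFirstValueWithDivisorAboveValue; infer_instance
def pvWitness_findFirstValueWithDivisorAboveValue : Int × Int := (7, -3)
def Spec_findFirstValueWithDivisorAboveValue (value : Int) (divisor : Int) (out : Int) : Prop := out = findFirstValueWithDivisorAboveValue_alt value divisor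
instance (value : Int) (divisor : Int) (out : Int) : Decidable (Spec_findFirstValueWithDivisorAboveValue value divisor out) := by unfold Spec_findFirstValueWithDivisorAboveValue; infer_instance

-- ===== CLAIM (what is proved, stated in full; the proofs are below) =====
def Claim_equal_findFirstValueWithDivisorAboveValue : Prop := ∀ (value : Int) (divisor : Int), Dom_findFirstValueWithDivisorAboveValue value divisor → Pre_findFirstValueWithDivisorAboveValue value divisor → Spec_findFirstValueWithDivisorAboveValue value divisor (findFirstValueWithDivisorAboveValue value divisor)

-- ===== LEMMAS AND PROOFS =====
-- A's loop computes the closed form: for divisor ≠ 0, pvLoopA divisor value = value + (-value) emod |divisor|.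
theorem pvLoopA_closed (divisor : Int) (hd : divisor ≠ 0) (value : Int) :
    pvLoopA divisor value = value + ((-value) % (divisor.natAbs : Int)) := by
  induction value using pvLoopA.induct divisor with
  | case1 value h ih =>
    rw [pvLoopA, dif_pos h, ih]
    obtain ⟨_, hm⟩ := h
    have hdpos : (0:Int) < (divisor.natAbs : Int) := by
      have := Int.natAbs_pos.mpr hd; exact_mod_cast this
    have hdvd : ¬ ((divisor.natAbs : Int) ∣ -value) := by
      intro hdvd
      apply hm
      rw [PySem.Int.mod_eq_zero_iff_dvd]
      have : divisor.natAbs ∣ value.natAbs := by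
        rw [Int.natCast_dvd_natCast.symm]
        simpa [Int.natAbs_dvd, Int.dvd_natAbs] using hdvd
      exact Int.natAbs_dvd_natAbs.mp this
    have h1 : (0:Int) ≤ ((-value) % (divisor.natAbs : Int)) := Int.emod_nonneg _ (by omega)
    have h2 : ((-value) % (divisor.natAbs : Int)) < (divisor.natAbs : Int) := Int.emod_lt_of_pos _ hdpos
    have hne : ((-value) % (divisor.natAbs : Int)) ≠ 0 := by
      intro h0; exact hdvd (Int.dvd_of_emod_eq_zero h0)
    have hq := Int.mul_ediv_add_emod (-value) (divisor.natAbs : Int)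
    have hrepr : -(value + 1)
        = ((-value) % (divisor.natAbs : Int) - 1) + (divisor.natAbs : Int) * ((-value) / (divisor.natAbs : Int)) := by
      omega
    have hstep : ((-(value + 1)) % (divisor.natAbs : Int))
        = ((-value) % (divisor.natAbs : Int)) - 1 := by
      rw [hrepr, Int.add_mul_emod_self_left, Int.emod_eq_of_lt (by omega) (by omega)]
    omega
  | case2 value h =>
    rw [pvLoopA, dif_neg h]
    push Not at h
    have hm := h hd
    rw [PySem.Int.mod_eq_zero_iff_dvd] at hm
    have : (divisor.natAbs : Int) ∣ -value := by
      have : divisor.natAbs ∣ value.natAbs := Int.natAbs_dvd_natAbs.mpr hm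
      have := Int.natCast_dvd_natCast.mpr this
      simpa [Int.natAbs_dvd, Int.dvd_natAbs] using this
    rw [Int.emod_eq_zero_of_dvd this]; omega

-- ===== VERDICT (by name: the statement is the Claim_ definition above) =====
theorem findFirstValueWithDivisorAboveValue_spec : Claim_equal_findFirstValueWithDivisorAboveValue := by
  intro value divisor _ hpre
  unfold Spec_findFirstValueWithDivisorAboveValue findFirstValueWithDivisorAboveValue findFirstValueWithDivisorAboveValue_alt
  rw [pvLoopA_closed divisor hpre value]
  have habs : |divisor| = (divisor.natAbs : Int) := Int.abs_eq_natAbs divisor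
  have hpos : (0:Int) < |divisor| := abs_pos.mpr hpre
  rw [PySem.Int.mod_eq_emod_of_pos hpos, habs]
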